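-- pv_equiv track=rewrite | github.com/grapeloverr/evil-discord-chatbot | train_personality.py | _extract_context_hints
-- ===== SOURCE A (Python) =====
-- def _extract_context_hints(input_text: str, response: str) -> list:
--     hints = []
--     low_input = (input_text or "").lower()
--     if "?" in low_input:
--         hints.append("answers_question")
--     if any(x in low_input for x in ["think", "opinion", "feel"]):
--         hints.append("opinion_given")
--     if any(x in low_input for x in ["help", "how to", "what is"]):
--         hints.append("provides_help")
--     if any(x in low_input for x in ["hi", "hello", "hey", "yo", "sup"]):
--         hints.append("greets_back")
--     if any(x in low_input for x in ["why", "rate", "roast"]):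
--         hints.append("banter")
--     return hints
-- ===== SOURCE B (Python) =====
-- # Single left-to-right scan over the lowered text: at each position, fire every
-- # keyword that starts there; tags are then emitted in the canonical rule order.
-- _KEYWORD_TAGS = [
--     ("?", "answers_question"),
--     ("think", "opinion_given"), ("opinion", "opinion_given"), ("feel", "opinion_given"),
--     ("help", "provides_help"), ("how to", "provides_help"), ("what is", "provides_help"),
--     ("hi", "greets_back"), ("hello", "greets_back"), ("hey", "greets_back"),
--     ("yo", "greets_back"), ("sup", "greets_back"),
--     ("why", "banter"), ("rate", "banter"), ("roast", "banter"),
-- ]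
-- _TAG_ORDER = ["answers_question", "opinion_given", "provides_help", "greets_back", "banter"]
--
-- def _extract_context_hints(input_text: str, response: str) -> list:
--     low = input_text.lower()
--     fired = set()
--     for i in range(len(low)):
--         for kw, tag in _KEYWORD_TAGS:
--             if low.startswith(kw, i):
--                 fired.add(tag)
--     return [tag for tag in _TAG_ORDER if tag in fired]
-- ===== Notes on version B (the rewrite author's own statement) =====
-- stated objective: alternative
-- what changed: Instead of five rule-major if-guards each doing its own substring searches, B makes one position-major scan of the lowered text, matching all 15 keywords at each position into a fired-tag set, and finally emits the tags in canonical order by filtering a tag-order list.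
import Mathlib
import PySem

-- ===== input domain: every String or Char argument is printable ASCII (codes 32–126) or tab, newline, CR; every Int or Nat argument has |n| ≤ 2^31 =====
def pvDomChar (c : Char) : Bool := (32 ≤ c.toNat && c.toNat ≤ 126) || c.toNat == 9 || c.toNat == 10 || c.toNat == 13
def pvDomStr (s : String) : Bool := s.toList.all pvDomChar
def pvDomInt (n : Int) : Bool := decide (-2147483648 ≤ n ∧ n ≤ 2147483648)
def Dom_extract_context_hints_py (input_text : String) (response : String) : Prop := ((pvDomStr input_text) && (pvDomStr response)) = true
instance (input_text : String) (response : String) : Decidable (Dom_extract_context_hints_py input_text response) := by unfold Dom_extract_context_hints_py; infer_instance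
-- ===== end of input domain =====

-- B replaces A's five rule-major guards (each doing its own substring searches) by one
-- position-major scan of the lowered text firing keywords into a tag set (alternative).
-- ===== PORT A =====
def extract_context_hints_py (input_text : String) (response : String) : List String :=
  let hints : List String := []
  let low_input := PySem.Str.lower (if input_text == "" then "" else input_text)
  let hints := if PySem.Str.isIn "?" low_input then hints ++ ["answers_question"] else hints
  let hints := if (["think", "opinion", "feel"].any (fun x => PySem.Str.isIn x low_input)) then hints ++ ["opinion_given"] else hints
  let hints := if (["help", "how to", "what is"].any (fun x => PySem.Str.isIn x low_input)) then hints ++ ["provides_help"] else hints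
  let hints := if (["hi", "hello", "hey", "yo", "sup"].any (fun x => PySem.Str.isIn x low_input)) then hints ++ ["greets_back"] else hints
  let hints := if (["why", "rate", "roast"].any (fun x => PySem.Str.isIn x low_input)) then hints ++ ["banter"] else hints
  hints

-- ===== PORT B =====
def pvKeywordTags : List (String × String) :=
  [ ("?", "answers_question"),
    ("think", "opinion_given"), ("opinion", "opinion_given"), ("feel", "opinion_given"),
    ("help", "provides_help"), ("how to", "provides_help"), ("what is", "provides_help"),
    ("hi", "greets_back"), ("hello", "greets_back"), ("hey", "greets_back"),
    ("yo", "greets_back"), ("sup", "greets_back"),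
    ("why", "banter"), ("rate", "banter"), ("roast", "banter") ]

def pvTagOrder : List String :=
  ["answers_question", "opinion_given", "provides_help", "greets_back", "banter"]

-- Source B's loop 'for i in range(len(low))' with 'low.startswith(kw, i)' is ported as structural
-- recursion over the suffix low.toList.drop i (exact: startswith(kw, i) ⟺ kw.toList <+: chars.drop i).
def pvScan : List Char → PySem.Set String → PySem.Set String
  | [], fired => fired
  | c :: rest, fired =>
      pvScan rest (pvKeywordTags.foldl
        (fun f p => if p.1.toList.isPrefixOf (c :: rest) then PySem.Set.add f p.2 else f) fired)

def extract_context_hints_py_alt (input_text : String) (response : String) : List String :=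
  let low := PySem.Str.lower input_text
  let fired := pvScan low.toList PySem.Set.empty
  pvTagOrder.filter (fun t => fired.contains t)

-- ===== PRECONDITION & SPEC =====
def Spec_extract_context_hints_py (input_text : String) (response : String) (out : List String) : Prop := out = extract_context_hints_py_alt input_text response
instance (input_text : String) (response : String) (out : List String) : Decidable (Spec_extract_context_hints_py input_text response out) := by unfold Spec_extract_context_hints_py; infer_instance

-- ===== CLAIM (what is proved, stated in full; the proofs are below) =====
def Claim_equal_extract_context_hints_py : Prop := ∀ (input_text : String) (response : String), Dom_extract_context_hints_py input_text response → Spec_extract_context_hints_py input_text response (extract_context_hints_py input_text response)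

-- ===== LEMMAS AND PROOFS =====

lemma pv_mem_foldl_add (cond : String × String → Bool) (l : List (String × String))
    (fired : PySem.Set String) (t : String) :
    t ∈ l.foldl (fun f p => if cond p then PySem.Set.add f p.2 else f) fired ↔
      t ∈ fired ∨ ∃ p ∈ l, cond p = true ∧ p.2 = t := by
  induction l generalizing fired with
  | nil => simp
  | cons p l ih =>
    simp only [List.foldl_cons, ih, List.exists_mem_cons_iff]
    by_cases h : cond p = true
    · rw [if_pos h]
      simp only [PySem.Set.mem_add, h, true_and, eq_comm]
      tauto
    · rw [if_neg h]
      simp [h]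

lemma pv_keyword_ne_nil : ∀ p ∈ pvKeywordTags, p.1.toList ≠ [] := by decide

lemma pv_mem_pvScan (l : List Char) (fired : PySem.Set String) (t : String) :
    t ∈ pvScan l fired ↔ t ∈ fired ∨ ∃ p ∈ pvKeywordTags, p.1.toList <:+: l ∧ p.2 = t := by
  induction l generalizing fired with
  | nil =>
    simp only [pvScan]
    constructor
    · exact Or.inl
    · rintro (h|⟨p, hp, hinf, _⟩)
      · exact h
      · exact absurd (List.infix_nil.mp hinf) (pv_keyword_ne_nil p hp)
  | cons c rest ih =>
    rw [pvScan, ih, pv_mem_foldl_add]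
    constructor
    · rintro ((h|⟨p, hp, hc, ht⟩)|⟨p, hp, hc, ht⟩)
      · exact Or.inl h
      · exact Or.inr ⟨p, hp, List.infix_cons_iff.mpr (Or.inl (List.isPrefixOf_iff_prefix.mp hc)), ht⟩
      · exact Or.inr ⟨p, hp, List.infix_cons_iff.mpr (Or.inr hc), ht⟩
    · rintro (h|⟨p, hp, hc, ht⟩)
      · exact Or.inl (Or.inl h)
      · rcases List.infix_cons_iff.mp hc with h'|h'
        · exact Or.inl (Or.inr ⟨p, hp, List.isPrefixOf_iff_prefix.mpr h', ht⟩)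
        · exact Or.inr ⟨p, hp, h', ht⟩

lemma pv_contains_iff (low : String) (t : String) :
    (pvScan low.toList PySem.Set.empty).contains t = true ↔
      ∃ p ∈ pvKeywordTags, PySem.Str.isIn p.1 low = true ∧ p.2 = t := by
  rw [show (pvScan low.toList PySem.Set.empty).contains t = List.contains (pvScan low.toList PySem.Set.empty) t from rfl,
    List.contains_iff_mem, pv_mem_pvScan]
  simp only [PySem.Set.empty, List.not_mem_nil, false_or, PySem.Str.isIn_iff_infix]

-- ===== VERDICT (by name: the statement is the Claim_ definition above) =====
theorem extract_context_hints_py_spec : Claim_equal_extract_context_hints_py := by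
  intro input_text response _
  unfold Spec_extract_context_hints_py extract_context_hints_py extract_context_hints_py_alt
  have hor : (if input_text == "" then "" else input_text) = input_text := by
    by_cases h : input_text == ""
    · simp_all
    · simp [h]
  rw [hor]
  have h1 : (pvScan (PySem.Str.lower input_text).toList PySem.Set.empty).contains "answers_question"
      = PySem.Str.isIn "?" (PySem.Str.lower input_text) := by
    rw [Bool.eq_iff_iff, pv_contains_iff]
    simp [pvKeywordTags]
  have h2 : (pvScan (PySem.Str.lower input_text).toList PySem.Set.empty).contains "opinion_given"
      = (["think", "opinion", "feel"].any (fun x => PySem.Str.isIn x (PySem.Str.lower input_text))) := by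
    rw [Bool.eq_iff_iff, pv_contains_iff]
    simp [pvKeywordTags, List.any]
  have h3 : (pvScan (PySem.Str.lower input_text).toList PySem.Set.empty).contains "provides_help"
      = (["help", "how to", "what is"].any (fun x => PySem.Str.isIn x (PySem.Str.lower input_text))) := by
    rw [Bool.eq_iff_iff, pv_contains_iff]
    simp [pvKeywordTags, List.any]
  have h4 : (pvScan (PySem.Str.lower input_text).toList PySem.Set.empty).contains "greets_back"
      = (["hi", "hello", "hey", "yo", "sup"].any (fun x => PySem.Str.isIn x (PySem.Str.lower input_text))) := by
    rw [Bool.eq_iff_iff, pv_contains_iff]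
    simp [pvKeywordTags, List.any]
  have h5 : (pvScan (PySem.Str.lower input_text).toList PySem.Set.empty).contains "banter"
      = (["why", "rate", "roast"].any (fun x => PySem.Str.isIn x (PySem.Str.lower input_text))) := by
    rw [Bool.eq_iff_iff, pv_contains_iff]
    simp [pvKeywordTags, List.any]
  simp only [pvTagOrder, List.filter_cons, List.filter_nil, h1, h2, h3, h4, h5]
  split_ifs <;> rfl
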